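-- pv_equiv track=rewrite | github.com/trungducng0410/technical-interview-practice | leetcode/valid-sudoku.py | isValidArr
-- ===== SOURCE A (Python) =====
-- def isValidArr(arr):
--     nums = set()
--     for n in arr:
--         if n != "." and n in nums:
--             return False
--         else:
--             nums.add(n)
--     return True
-- ===== SOURCE B (Python) =====
-- def isValidArr(arr):
--     vals = sorted(n for n in arr if n != ".")
--     return all(a != b for a, b in zip(vals, vals[1:]))
-- ===== Notes on version B (the rewrite author's own statement) =====
-- stated objective: alternative
-- what changed: Replaces the hash-set scan with early return by sorting the non-dot values and checking that no two adjacent sorted values are equal (duplicates are adjacent after sorting).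
import Mathlib
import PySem

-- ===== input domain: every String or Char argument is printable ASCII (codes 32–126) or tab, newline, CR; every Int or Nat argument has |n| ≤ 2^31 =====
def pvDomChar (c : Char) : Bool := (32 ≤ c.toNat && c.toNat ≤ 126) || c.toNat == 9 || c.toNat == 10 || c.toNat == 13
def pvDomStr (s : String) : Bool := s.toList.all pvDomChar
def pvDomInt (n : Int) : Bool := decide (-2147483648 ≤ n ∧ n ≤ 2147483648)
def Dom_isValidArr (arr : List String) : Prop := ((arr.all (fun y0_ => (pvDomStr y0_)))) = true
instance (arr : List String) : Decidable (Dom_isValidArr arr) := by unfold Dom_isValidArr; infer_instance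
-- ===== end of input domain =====

-- B replaces A's hash-set scan with early return by sorting the non-dot values and
-- checking no two adjacent sorted values are equal (objective: alternative algorithm).

-- ===== PORT A =====
-- for n in arr: if n != "." and n in nums: return False else: nums.add(n)
def isValidArrGo : List String → PySem.Set String → Bool
  | [], _ => true
  | n :: rest, nums =>
      if (n != ".") && PySem.Set.contains nums n then false
      else isValidArrGo rest (PySem.Set.add nums n)

def isValidArr (arr : List String) : Bool :=
  isValidArrGo arr PySem.Set.empty

-- ===== PORT B =====
-- all(a != b for a, b in zip(vals, vals[1:])) over the sorted non-dot values
def noAdjEq (l : List String) : Bool :=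
  ((l.zip (l.drop 1)).all (fun p => p.1 != p.2))

-- vals = sorted(n for n in arr if n != "."); return all(a != b for a, b in zip(vals, vals[1:]))
def isValidArr_alt (arr : List String) : Bool :=
  let vals := PySem.List.sorted (arr.filter (fun n => n != ".")) (fun x => x) false
  noAdjEq vals

-- ===== PRECONDITION & SPEC =====
def Spec_isValidArr (arr : List String) (out : Bool) : Prop := out = isValidArr_alt arr
instance (arr : List String) (out : Bool) : Decidable (Spec_isValidArr arr out) := by unfold Spec_isValidArr; infer_instance

-- ===== CLAIM (what is proved, stated in full; the proofs are below) =====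
def Claim_equal_isValidArr : Prop := ∀ (arr : List String), Dom_isValidArr arr → Spec_isValidArr arr (isValidArr arr)

-- ===== LEMMAS AND PROOFS =====

-- A's loop, started from any set s, succeeds iff the non-dot values are pairwise
-- distinct and none of them is already in s.
theorem isValidArrGo_iff (arr : List String) (s : PySem.Set String) :
    isValidArrGo arr s = true ↔
      ((arr.filter (fun n => n != ".")).Nodup ∧
        ∀ x ∈ arr.filter (fun n => n != "."), x ∉ s) := by
  induction arr generalizing s with
  | nil => simp [isValidArrGo]
  | cons n rest ih =>
    by_cases hd : n = "."
    · subst hd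
      rw [show isValidArrGo ("." :: rest) s = isValidArrGo rest (PySem.Set.add s ".")
            from by simp [isValidArrGo]]
      rw [ih]
      simp only [List.filter_cons, bne_self_eq_false, Bool.false_eq_true, if_false]
      constructor
      · rintro ⟨h1, h2⟩
        exact ⟨h1, fun x hx hxs => h2 x hx ((PySem.Set.mem_add _ _ _).mpr (Or.inl hxs))⟩
      · rintro ⟨h1, h2⟩
        refine ⟨h1, fun x hx hxs => ?_⟩
        rcases (PySem.Set.mem_add _ _ _).mp hxs with h | h
        · exact h2 x hx h
        · simp [List.mem_filter, h] at hx
    · have hcond : (n != ".") = true := by simp [hd]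
      by_cases hm : n ∈ s
      · rw [show isValidArrGo (n :: rest) s = false from by
              simp only [isValidArrGo]
              simp [hcond, hm]]
        simp only [Bool.false_eq_true, false_iff, List.filter_cons, hcond, if_true, not_and]
        intro _ h2
        exact h2 n (List.mem_cons_self ..) hm
      · rw [show isValidArrGo (n :: rest) s = isValidArrGo rest (PySem.Set.add s n)
              from by
              simp only [isValidArrGo]
              simp [hm]]
        rw [ih]
        simp only [List.filter_cons, hcond, if_true, List.nodup_cons, List.forall_mem_cons,
          PySem.Set.mem_add, not_or]
        constructor
        · rintro ⟨h1, h2⟩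
          exact ⟨⟨fun hn => (h2 n hn).2 rfl, h1⟩, hm, fun x hx => (h2 x hx).1⟩
        · rintro ⟨⟨hn, h1⟩, _, h2⟩
          exact ⟨h1, fun x hx => ⟨h2 x hx, fun he => hn (he ▸ hx)⟩⟩

-- On a list sorted in nondecreasing order, adjacent values all distinct iff no duplicates.
theorem noAdjEq_iff (l : List String) (h : l.Pairwise (· ≤ ·)) :
    noAdjEq l = true ↔ l.Nodup := by
  induction l with
  | nil => simp [noAdjEq]
  | cons a t ih =>
    rcases List.pairwise_cons.mp h with ⟨ha, ht⟩
    cases t with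
    | nil => simp [noAdjEq]
    | cons b t' =>
      rcases List.pairwise_cons.mp ht with ⟨hb, _⟩
      have hstep : noAdjEq (a :: b :: t') = ((a != b) && noAdjEq (b :: t')) := by
        simp [noAdjEq, List.zip, List.all_cons]
      rw [hstep]
      simp only [Bool.and_eq_true, bne_iff_ne, ih ht, List.nodup_cons]
      constructor
      · rintro ⟨hab, hnb⟩
        refine ⟨?_, hnb⟩
        intro hmem
        rcases List.mem_cons.mp hmem with he | hmem'
        · exact hab he
        · have hab' : a < b := lt_of_le_of_ne (ha b (List.mem_cons_self ..)) hab
          have hba : b ≤ a := hb a hmem'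
          exact absurd hab' (not_lt.mpr hba)
      · rintro ⟨hna, hnb⟩
        exact ⟨fun he => hna (he ▸ List.mem_cons_self ..), hnb⟩

theorem isValidArr_alt_iff (arr : List String) :
    isValidArr_alt arr = true ↔ (arr.filter (fun n => n != ".")).Nodup := by
  unfold isValidArr_alt
  have hperm := PySem.List.sorted_perm (arr.filter (fun n => n != ".")) (fun x => x) false
  have hpw := PySem.List.sorted_pairwise (xs := arr.filter (fun n => n != ".")) (key := fun x => x)
  rw [noAdjEq_iff _ hpw, hperm.nodup_iff]

-- ===== VERDICT (by name: the statement is the Claim_ definition above) =====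
theorem isValidArr_spec : Claim_equal_isValidArr := by
  intro arr _
  unfold Spec_isValidArr
  rw [Bool.eq_iff_iff, isValidArr, isValidArrGo_iff, isValidArr_alt_iff]
  simp [PySem.Set.empty]
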